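-- pv_equiv track=rewrite | github.com/nutthanonn/kmutt-lab-homework | exam/บท9/09-07.py | pattern3
-- ===== SOURCE A (Python) =====
-- def pattern3(N):
--     m = [[0]*N for _ in range(N)]
--     c = 1
--     for i in range(N):
--         for j in range(i, N):
--             m[i][j] = c
--             c += 1
--     return m
-- ===== SOURCE B (Python) =====
-- def pattern3(N):
--     return [[0] * i + list(range(1 + i*N - i*(i-1)//2,
--                                  1 + (i+1)*N - (i+1)*i//2))
--             for i in range(N)]
-- ===== Notes on version B (the rewrite author's own statement) =====
-- stated objective: alternative
-- what changed: Replaces A's zero-matrix initialization plus nested fill loops with a sequentially incremented counter by a single comprehension computing each cell from its coordinates via the closed form 1 + i*N - i*(i-1)//2 + (j - i) for j >= i and 0 otherwise.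
import Mathlib
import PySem

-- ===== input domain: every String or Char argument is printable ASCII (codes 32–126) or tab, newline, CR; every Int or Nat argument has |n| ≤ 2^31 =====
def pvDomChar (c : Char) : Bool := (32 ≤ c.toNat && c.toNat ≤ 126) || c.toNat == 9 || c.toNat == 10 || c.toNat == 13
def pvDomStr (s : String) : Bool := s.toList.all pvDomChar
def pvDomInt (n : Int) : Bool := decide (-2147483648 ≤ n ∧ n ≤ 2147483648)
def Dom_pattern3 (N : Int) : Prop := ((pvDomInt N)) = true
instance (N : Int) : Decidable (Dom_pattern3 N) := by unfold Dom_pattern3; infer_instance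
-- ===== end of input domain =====

-- B replaces A's sequentially incremented counter by a closed form per row: row i is
-- i zeros followed by range(1 + i*N - i*(i-1)//2, 1 + (i+1)*N - (i+1)*i//2), in one comprehension.


-- ===== PORT A =====
-- literal port of A: build an N×N zero matrix, then fill the upper triangle
-- row by row with a running counter c starting at 1.
def pattern3 (N : Int) : List (List Int) :=
  let m0 : List (List Int) := (PySem.List.pyRange 0 N 1).map (fun _ => PySem.List.pyRepeat [(0 : Int)] N)
  let res := (PySem.List.pyRange 0 N 1).foldl
    (fun (st : List (List Int) × Int) i =>
      (PySem.List.pyRange i N 1).foldl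
        (fun (st : List (List Int) × Int) j =>
          (st.1.set i.toNat ((st.1.getD i.toNat []).set j.toNat st.2), st.2 + 1)) st)
    (m0, 1)
  res.1

-- ===== PORT B =====
-- literal port of B: one comprehension; row i is i zeros followed by the range of
-- its closed-form start/end values.
def pattern3_alt (N : Int) : List (List Int) :=
  (PySem.List.pyRange 0 N 1).map (fun i =>
    PySem.List.pyRepeat [(0 : Int)] i ++
      PySem.List.pyRange (1 + i * N - PySem.Int.floordiv (i * (i - 1)) 2)
                         (1 + (i + 1) * N - PySem.Int.floordiv ((i + 1) * i) 2) 1)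

-- ===== PRECONDITION & SPEC =====
def Spec_pattern3 (N : Int) (out : List (List Int)) : Prop := out = pattern3_alt N
instance (N : Int) (out : List (List Int)) : Decidable (Spec_pattern3 N out) := by unfold Spec_pattern3; infer_instance

-- ===== CLAIM (what is proved, stated in full; the proofs are below) =====
def Claim_equal_pattern3 : Prop := ∀ (N : Int), Dom_pattern3 N → Spec_pattern3 N (pattern3 N)

-- ===== LEMMAS AND PROOFS =====

-- rows a, a+1, …, a+fuel-1 of the finished matrix, where c is the first value
-- written into row a (proof-side description of A's outer loop).
def rowsAux (n : Nat) : Int → Nat → Nat → List (List Int)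
  | _, _, 0 => []
  | c, a, fuel+1 =>
      (List.replicate a (0:Int) ++ (List.range (n - a)).map (fun (k : Nat) => c + (k : Int)))
        :: rowsAux n (c + ((n : Int) - (a : Int))) (a+1) fuel

theorem take_set_succ (l : List Int) (i : Nat) (a : Int) (h : i < l.length) :
    (l.set i a).take (i+1) = l.take i ++ [a] := by
  induction l generalizing i with
  | nil => simp at h
  | cons x t ih =>
    cases i with
    | zero => simp
    | succ k => simp at h ⊢; exact ih k h

theorem take_set_succ' (l : List (List Int)) (i : Nat) (a : List Int) (h : i < l.length) :
    (l.set i a).take (i+1) = l.take i ++ [a] := by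
  induction l generalizing i with
  | nil => simp at h
  | cons x t ih =>
    cases i with
    | zero => simp
    | succ k => simp at h ⊢; exact ih k h

-- A's inner loop on a single row: consecutive values c, c+1, … overwrite the
-- whole tail of the row from position a on.
theorem rowFold (b : Int) (fuel : Nat) : ∀ (a : Int), 0 ≤ a → a ≤ b → (b - a).toNat = fuel →
    ∀ (r : List Int) (c : Int), r.length = b.toNat →
    (PySem.List.pyRange a b 1).foldl (fun (st : List Int × Int) j => (st.1.set j.toNat st.2, st.2 + 1)) (r, c)
      = (r.take a.toNat ++ (List.range (b.toNat - a.toNat)).map (fun (k : Nat) => c + (k : Int)), c + (b - a)) := by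
  induction fuel with
  | zero =>
    intro a h0 hab hfuel r c hr
    have hab' : a = b := by omega
    subst hab'
    have : PySem.List.pyRange a a 1 = [] := by simp [PySem.List.pyRange]
    rw [this]
    simp only [List.foldl_nil, Nat.sub_self, List.range_zero, List.map_nil, List.append_nil]
    rw [List.take_of_length_le (by omega)]
    simp
  | succ f ih =>
    intro a h0 hab hfuel r c hr
    have hlt : a < b := by omega
    rw [PySem.List.pyRange_one_cons hlt]
    rw [List.foldl_cons]
    rw [ih (a+1) (by omega) (by omega) (by omega) (r.set a.toNat c) (c+1) (by simp [hr])]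
    have hn : a.toNat < b.toNat := by omega
    have h1 : (a+1).toNat = a.toNat + 1 := by omega
    simp only [Prod.mk.injEq]
    constructor
    · rw [h1, take_set_succ r a.toNat c (by omega)]
      rw [List.append_assoc, List.singleton_append]
      congr 1
      have hm : b.toNat - a.toNat = (b.toNat - (a.toNat + 1)) + 1 := by omega
      rw [hm, List.range_succ_eq_map, List.map_cons, List.map_map]
      congr 1
      · simp
      · apply List.map_congr_left
        intro k _
        simp only [Function.comp]
        push_cast
        ring
    · omega

-- A's inner loop factored: it only ever touches row i of the matrix.
theorem innerFactor (i : Nat) (js : List Int) : ∀ (m : List (List Int)) (c : Int), i < m.length →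
    js.foldl (fun (st : List (List Int) × Int) j =>
        (st.1.set i ((st.1.getD i []).set j.toNat st.2), st.2 + 1)) (m, c)
      = (m.set i (js.foldl (fun (st : List Int × Int) j => (st.1.set j.toNat st.2, st.2 + 1)) (m.getD i [], c)).1,
         (js.foldl (fun (st : List Int × Int) j => (st.1.set j.toNat st.2, st.2 + 1)) (m.getD i [], c)).2) := by
  induction js with
  | nil =>
    intro m c h
    simp only [List.foldl_nil]
    conv_lhs => rw [show m = m.set i (m.getD i []) from by rw [List.getD, List.getElem?_eq_getElem h]; simp]
  | cons j js ih =>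
    intro m c h
    rw [List.foldl_cons, List.foldl_cons]
    rw [ih (m.set i ((m.getD i []).set j.toNat c)) (c+1) (by simpa using h)]
    have hg : (m.set i ((m.getD i []).set j.toNat c)).getD i [] = (m.getD i []).set j.toNat c := by
      simp [List.getD, h]
    rw [hg, List.set_set]

-- A's outer loop: starting at row a with counter c on a matrix whose rows from
-- a on are still all-zero, it produces the rowsAux rows in place.
theorem outerFold (N : Int) (fuel : Nat) : ∀ (a : Int), 0 ≤ a → a ≤ N → (N - a).toNat = fuel →
    ∀ (m : List (List Int)) (c : Int), m.length = N.toNat →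
    (∀ k : Nat, a.toNat ≤ k → k < N.toNat → m.getD k [] = List.replicate N.toNat 0) →
    ((PySem.List.pyRange a N 1).foldl
       (fun (st : List (List Int) × Int) i =>
         (PySem.List.pyRange i N 1).foldl
           (fun (st : List (List Int) × Int) j =>
             (st.1.set i.toNat ((st.1.getD i.toNat []).set j.toNat st.2), st.2 + 1)) st)
       (m, c)).1
      = m.take a.toNat ++ rowsAux N.toNat c a.toNat fuel := by
  induction fuel with
  | zero =>
    intro a h0 hab hfuel m c hm _
    have hab' : a = N := by omega
    have : PySem.List.pyRange a N 1 = [] := by subst hab'; simp [PySem.List.pyRange]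
    rw [this]
    simp only [List.foldl_nil, rowsAux, List.append_nil]
    rw [List.take_of_length_le (by omega)]
  | succ f ih =>
    intro a h0 hab hfuel m c hm hrows
    have hlt : a < N := by omega
    have hidx : a.toNat < m.length := by omega
    rw [PySem.List.pyRange_one_cons hlt, List.foldl_cons]
    rw [innerFactor a.toNat (PySem.List.pyRange a N 1) m c hidx]
    rw [hrows a.toNat (le_refl _) (by omega)]
    rw [rowFold N (N - a).toNat a h0 (by omega) rfl _ c (by simp)]
    set R : List Int := (List.replicate N.toNat (0:Int)).take a.toNat ++
        (List.range (N.toNat - a.toNat)).map (fun (k : Nat) => c + (k : Int)) with hR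
    rw [ih (a+1) (by omega) (by omega) (by omega) (m.set a.toNat R) (c + (N - a))
        (by simp [hm])
        (by intro k hk1 hk2
            have hk : a.toNat ≠ k := by omega
            rw [List.getD, List.getElem?_set_ne hk, ← List.getD]
            exact hrows k (by omega) hk2)]
    have h1 : (a+1).toNat = a.toNat + 1 := by omega
    rw [h1, take_set_succ' m a.toNat R hidx, List.append_assoc, List.singleton_append]
    congr 1
    simp only [rowsAux]
    congr 1
    · rw [hR, List.take_replicate, Nat.min_eq_left (by omega)]
    · congr 1
      omega

-- closed-form start value of row a (B's formula, with Int division written as ediv)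
def startI (n : Nat) (a : Nat) : Int := 1 + (a : Int) * n - ((a : Int) * ((a : Int) - 1)) / 2

-- a pyRange with step 1 is an affine map over a Nat range.
theorem pyRange_affine (fuel : Nat) : ∀ (st e : Int), (e - st).toNat = fuel →
    PySem.List.pyRange st e 1 = (List.range fuel).map (fun (k : Nat) => st + (k : Int)) := by
  induction fuel with
  | zero =>
    intro st e h
    have : e ≤ st := by omega
    simp [PySem.List.pyRange]
    omega
  | succ f ih =>
    intro st e h
    rw [PySem.List.pyRange_one_cons (by omega), ih (st + 1) e (by omega)]
    rw [List.range_succ_eq_map, List.map_cons, List.map_map]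
    congr 1
    · simp
    · apply List.map_congr_left
      intro k _
      simp only [Function.comp]
      push_cast
      ring

-- rowsAux with B's closed-form start values is exactly B's list of rows.
theorem rowsAux_alt (n : Nat) (fuel : Nat) : ∀ (a : Nat), a + fuel = n →
    rowsAux n (startI n a) a fuel
      = (List.range' a fuel).map (fun i =>
          List.replicate i (0 : Int) ++ (List.range (n - i)).map (fun (k : Nat) => startI n i + (k : Int))) := by
  induction fuel with
  | zero => intro a _; simp [rowsAux]
  | succ f ih =>
    intro a ha
    simp only [rowsAux, List.range'_succ, List.map_cons]
    congr 1
    have hstep : startI n a + ((n : Int) - (a : Int)) = startI n (a + 1) := by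
      unfold startI
      push_cast
      have h2 : ((a : Int) + 1) * ((a : Int) + 1 - 1) = (a : Int) * ((a : Int) - 1) + (a : Int) * 2 := by
        ring
      rw [h2, Int.add_mul_ediv_right _ _ (by norm_num : (2:Int) ≠ 0)]
      ring
    rw [hstep]
    exact ih (a + 1) (by omega)

-- B's port written over Nat ranges.
theorem alt_unfold (n : Nat) : pattern3_alt (n : Int)
    = (List.range n).map (fun i =>
        List.replicate i (0 : Int) ++ (List.range (n - i)).map (fun (k : Nat) => startI n i + (k : Int))) := by
  unfold pattern3_alt
  rw [PySem.List.pyRange_zero_natCast, List.map_map]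
  apply List.map_congr_left
  intro i hi
  rw [List.mem_range] at hi
  simp only [Function.comp]
  rw [PySem.List.pyRepeat_singleton]
  congr 1
  rw [PySem.Int.floordiv_eq_ediv_of_pos (by norm_num), PySem.Int.floordiv_eq_ediv_of_pos (by norm_num)]
  have h4 : ((i : Int) + 1) * (i : Int) = (i : Int) * ((i : Int) - 1) + (i : Int) * 2 := by ring
  have h3 : ((1 + ((i : Int) + 1) * (n : Int) - ((i : Int) + 1) * (i : Int) / 2)
      - (1 + (i : Int) * (n : Int) - (i : Int) * ((i : Int) - 1) / 2)).toNat = n - i := by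
    rw [h4, Int.add_mul_ediv_right _ _ (by norm_num : (2:Int) ≠ 0)]
    have h5 : ((i : Int) + 1) * (n : Int) = (i : Int) * (n : Int) + (n : Int) := by ring
    omega
  rw [pyRange_affine (n - i) _ _ h3]
  apply List.map_congr_left
  intro k _
  unfold startI
  norm_num

-- A's port for nonnegative N reduces to rowsAux.
theorem a_unfold (n : Nat) : pattern3 (n : Int) = rowsAux n 1 0 n := by
  unfold pattern3
  simp only []
  rw [outerFold (n : Int) n 0 (by omega) (by omega) (by omega) _ 1
      (by rw [PySem.List.pyRange_zero_natCast]; simp)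
      (by intro k _ hk
          rw [PySem.List.pyRange_zero_natCast, List.map_map]
          have : ((List.range n).map ((fun _ => PySem.List.pyRepeat [(0:Int)] (n : Int)) ∘ (Nat.cast : Nat → Int))).getD k []
              = PySem.List.pyRepeat [(0:Int)] (n : Int) := by
            rw [List.getD, List.getElem?_map, List.getElem?_range (show k < n by omega)]
            rfl
          rw [this, PySem.List.pyRepeat_singleton])]
  simp

-- ===== VERDICT (by name: the statement is the Claim_ definition above) =====
theorem pattern3_spec : Claim_equal_pattern3 := by
  unfold Claim_equal_pattern3
  intro N _
  unfold Spec_pattern3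
  by_cases hN : N ≤ 0
  · have hr : PySem.List.pyRange 0 N 1 = [] := by simp [PySem.List.pyRange]; omega
    unfold pattern3 pattern3_alt
    rw [hr]
    simp
  · push Not at hN
    obtain ⟨n, rfl⟩ : ∃ n : Nat, N = (n : Int) := ⟨N.toNat, by omega⟩
    rw [a_unfold n, alt_unfold n]
    have h1 : (1 : Int) = startI n 0 := by unfold startI; norm_num
    rw [h1, rowsAux_alt n n 0 (by omega), ← List.range_eq_range']
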